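-- pv_equiv track=rewrite | github.com/paiml/depyler | examples/hard_final_sec_kdf.py | derive_multiple_keys
-- ===== SOURCE A (Python) =====
-- def hash_word(state: int, word: int) -> int:
--     """Mix one word into hash state."""
--     state = (state * 37 + word + 1) % 65536
--     rotated: int = ((state * 8) % 65536) + (state // 8192)
--     return (state + rotated) % 65536
--
-- def hash_list(data: list[int], seed: int) -> int:
--     """Hash an integer list with a seed."""
--     state: int = seed
--     i: int = 0
--     while i < len(data):
--         dv: int = data[i]
--         state = hash_word(state, dv)
--         i = i + 1
--     return state
--
-- def pbkdf_derive(password: list[int], salt: list[int], iterations: int) -> int: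
--     """Derive key from password and salt with iteration count."""
--     combined: list[int] = []
--     i: int = 0
--     while i < len(password):
--         pv: int = password[i]
--         combined.append(pv)
--         i = i + 1
--     j: int = 0
--     while j < len(salt):
--         sv: int = salt[j]
--         combined.append(sv)
--         j = j + 1
--     derived: int = hash_list(combined, 0)
--     r: int = 1
--     while r < iterations:
--         derived = hash_word(derived, r)
--         r = r + 1
--     return derived
--
-- def derive_multiple_keys(password: list[int], salt: list[int], iterations: int, num_keys: int) -> list[int]:
--     """Derive multiple keys by varying the salt."""
--     keys: list[int] = []
--     ki: int = 0
--     while ki < num_keys: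
--         augmented_salt: list[int] = []
--         si: int = 0
--         while si < len(salt):
--             sv: int = salt[si]
--             augmented_salt.append(sv)
--             si = si + 1
--         augmented_salt.append(ki)
--         derived: int = pbkdf_derive(password, augmented_salt, iterations)
--         keys.append(derived)
--         ki = ki + 1
--     return keys
-- ===== SOURCE B (Python) =====
-- def hash_word(state: int, word: int) -> int:
--     state = (state * 37 + word + 1) % 65536
--     rotated = ((state * 8) % 65536) + (state // 8192)
--     return (state + rotated) % 65536
--
-- def derive_multiple_keys(password: list[int], salt: list[int], iterations: int, num_keys: int) -> list[int]:
--     # Hash password+salt once; each key only mixes in its index and iterates.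
--     base = 0
--     for v in password:
--         base = hash_word(base, v)
--     for v in salt:
--         base = hash_word(base, v)
--     keys = []
--     for ki in range(num_keys):
--         d = hash_word(base, ki)
--         for r in range(1, iterations):
--             d = hash_word(d, r)
--         keys.append(d)
--     return keys
-- ===== Notes on version B (the rewrite author's own statement) =====
-- stated objective: faster
-- what changed: B hashes password+salt into a shared state once and derives each key from that state by mixing in only the key index, instead of rebuilding and rehashing the full password+salt list for every key.
import Mathlib
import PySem

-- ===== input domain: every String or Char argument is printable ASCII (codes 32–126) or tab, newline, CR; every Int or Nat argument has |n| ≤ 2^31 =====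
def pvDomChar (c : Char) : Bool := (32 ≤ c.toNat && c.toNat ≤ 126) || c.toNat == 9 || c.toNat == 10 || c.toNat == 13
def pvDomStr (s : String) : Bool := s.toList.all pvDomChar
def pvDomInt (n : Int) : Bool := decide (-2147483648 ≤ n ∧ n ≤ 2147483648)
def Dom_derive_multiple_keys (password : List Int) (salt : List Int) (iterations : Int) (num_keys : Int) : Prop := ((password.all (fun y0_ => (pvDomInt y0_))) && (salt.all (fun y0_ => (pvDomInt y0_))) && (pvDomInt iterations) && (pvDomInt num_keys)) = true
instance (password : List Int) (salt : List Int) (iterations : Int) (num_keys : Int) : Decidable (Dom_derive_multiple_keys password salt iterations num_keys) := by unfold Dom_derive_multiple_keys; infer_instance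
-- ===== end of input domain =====

-- B hashes password+salt into a shared state once and derives each key from it (mixing in only the
-- key index), instead of rebuilding and rehashing the full password+salt list for every key.

-- ===== PORT A =====
def hash_word (state word : Int) : Int :=
  let state := PySem.Int.mod (state * 37 + word + 1) 65536
  let rotated : Int := PySem.Int.mod (state * 8) 65536 + PySem.Int.floordiv state 8192
  PySem.Int.mod (state + rotated) 65536

def hash_list (data : List Int) (seed : Int) : Int :=
  data.foldl (fun state dv => hash_word state dv) seed

def pbkdf_derive (password : List Int) (salt : List Int) (iterations : Int) : Int :=
  let combined : List Int :=
    salt.foldl (fun acc sv => acc ++ [sv]) (password.foldl (fun acc pv => acc ++ [pv]) [])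
  let derived : Int := hash_list combined 0
  (PySem.List.pyRange 1 iterations 1).foldl (fun derived r => hash_word derived r) derived

def derive_multiple_keys (password : List Int) (salt : List Int) (iterations : Int) (num_keys : Int) : List Int :=
  (PySem.List.pyRange 0 num_keys 1).foldl (fun keys ki =>
    let augmented_salt : List Int := (salt.foldl (fun acc sv => acc ++ [sv]) []) ++ [ki]
    keys ++ [pbkdf_derive password augmented_salt iterations]) []

-- ===== PORT B =====
def derive_multiple_keys_alt (password : List Int) (salt : List Int) (iterations : Int) (num_keys : Int) : List Int :=
  let base : Int := salt.foldl (fun b v => hash_word b v) (password.foldl (fun b v => hash_word b v) 0)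
  (PySem.List.pyRange 0 num_keys 1).foldl (fun keys ki =>
    let d : Int := hash_word base ki
    keys ++ [(PySem.List.pyRange 1 iterations 1).foldl (fun d r => hash_word d r) d]) []

-- ===== PRECONDITION & SPEC =====
def Spec_derive_multiple_keys (password : List Int) (salt : List Int) (iterations : Int) (num_keys : Int) (out : List Int) : Prop := out = derive_multiple_keys_alt password salt iterations num_keys
instance (password : List Int) (salt : List Int) (iterations : Int) (num_keys : Int) (out : List Int) : Decidable (Spec_derive_multiple_keys password salt iterations num_keys out) := by unfold Spec_derive_multiple_keys; infer_instance

-- ===== CLAIM (what is proved, stated in full; the proofs are below) =====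
def Claim_equal_derive_multiple_keys : Prop := ∀ (password : List Int) (salt : List Int) (iterations : Int) (num_keys : Int), Dom_derive_multiple_keys password salt iterations num_keys → Spec_derive_multiple_keys password salt iterations num_keys (derive_multiple_keys password salt iterations num_keys)

-- ===== LEMMAS AND PROOFS =====
theorem foldl_snoc_eq_append (l init : List Int) :
    l.foldl (fun acc v => acc ++ [v]) init = init ++ l := by
  induction l generalizing init with
  | nil => simp
  | cons x xs ih => simp [List.foldl_cons, ih]

theorem pbkdf_augmented (password salt : List Int) (iterations ki : Int) :
    pbkdf_derive password ((salt.foldl (fun acc sv => acc ++ [sv]) []) ++ [ki]) iterations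
      = (PySem.List.pyRange 1 iterations 1).foldl (fun d r => hash_word d r)
          (hash_word (salt.foldl (fun b v => hash_word b v)
            (password.foldl (fun b v => hash_word b v) 0)) ki) := by
  unfold pbkdf_derive hash_list
  rw [foldl_snoc_eq_append, foldl_snoc_eq_append, foldl_snoc_eq_append]
  simp [List.foldl_append]

-- ===== VERDICT (by name: the statement is the Claim_ definition above) =====
theorem derive_multiple_keys_spec : Claim_equal_derive_multiple_keys := by
  intro password salt iterations num_keys _
  unfold Spec_derive_multiple_keys derive_multiple_keys derive_multiple_keys_alt
  have h : (fun (keys : List Int) (ki : Int) =>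
      keys ++ [pbkdf_derive password ((salt.foldl (fun acc sv => acc ++ [sv]) []) ++ [ki]) iterations])
    = (fun (keys : List Int) (ki : Int) =>
      keys ++ [(PySem.List.pyRange 1 iterations 1).foldl (fun d r => hash_word d r)
        (hash_word (salt.foldl (fun b v => hash_word b v)
          (password.foldl (fun b v => hash_word b v) 0)) ki)]) :=
    funext fun keys => funext fun ki => by rw [pbkdf_augmented]
  simp only [h]
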